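-- pv_equiv track=rewrite | github.com/kaviyavarshini08/DAA0666 | CHAPTER 5.py | is_unique_mst
-- ===== SOURCE A (Python) =====
-- class UnionFind:
--     def __init__(self, n):
--         self.parent = list(range(n))
--         self.rank = [0] * n
--
--     def find(self, u):
--         if self.parent[u] != u:
--             self.parent[u] = self.find(self.parent[u])
--         return self.parent[u]
--
--     def union(self, u, v):
--         root_u = self.find(u)
--         root_v = self.find(v)
--         if root_u != root_v:
--             if self.rank[root_u] > self.rank[root_v]:
--                 self.parent[root_v] = root_u
--             elif self.rank[root_u] < self.rank[root_v]:
--                 self.parent[root_u] = root_v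
--             else:
--                 self.parent[root_v] = root_u
--                 self.rank[root_u] += 1
--
-- def is_unique_mst(n, edges, given_mst):
--     def find_mst():
--         uf = UnionFind(n)
--         mst = []
--         for u, v, weight in edges:
--             if uf.find(u) != uf.find(v):
--                 uf.union(u, v)
--                 mst.append((u, v, weight))
--         return mst
--
--     edges.sort(key=lambda x: x[2])
--     given_mst_set = set(given_mst)
--
--     first_mst = find_mst()
--     if set(first_mst) == given_mst_set:
--         return True, first_mst, None
--
--     for u, v, w in first_mst:
--         if (u, v, w) not in given_mst_set:
--             alternate_mst = find_mst()
--             return False, first_mst, alternate_mst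
--
--     return True, first_mst, None
-- ===== SOURCE B (Python) =====
-- # Simpler re-implementation: component labels relabelled per accepted edge instead of a
-- # recursive union-find, and one subset test instead of set-equality + rescan + recompute.
-- # Like A, it sorts `edges` in place (same observable mutation).
-- def is_unique_mst(n, edges, given_mst):
--     edges.sort(key=lambda x: x[2])
--     given_set = set(given_mst)
--     comp = list(range(n))
--     first_mst = []
--     for u, v, w in edges:
--         cu, cv = comp[u], comp[v]
--         if cu != cv:
--             first_mst.append((u, v, w))
--             comp = [cu if c == cv else c for c in comp]
--     if all(e in given_set for e in first_mst):
--         return True, first_mst, None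
--     return False, first_mst, list(first_mst)
-- ===== Notes on version B (the rewrite author's own statement) =====
-- stated objective: simpler
-- what changed: Replaced the recursive path-compressing rank-based union-find with a flat component-label list that is relabelled on each accepted edge, and replaced the set-equality test plus rescan-and-recompute tail with a single subset test returning first_mst itself as the alternate tree.
import Mathlib
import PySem

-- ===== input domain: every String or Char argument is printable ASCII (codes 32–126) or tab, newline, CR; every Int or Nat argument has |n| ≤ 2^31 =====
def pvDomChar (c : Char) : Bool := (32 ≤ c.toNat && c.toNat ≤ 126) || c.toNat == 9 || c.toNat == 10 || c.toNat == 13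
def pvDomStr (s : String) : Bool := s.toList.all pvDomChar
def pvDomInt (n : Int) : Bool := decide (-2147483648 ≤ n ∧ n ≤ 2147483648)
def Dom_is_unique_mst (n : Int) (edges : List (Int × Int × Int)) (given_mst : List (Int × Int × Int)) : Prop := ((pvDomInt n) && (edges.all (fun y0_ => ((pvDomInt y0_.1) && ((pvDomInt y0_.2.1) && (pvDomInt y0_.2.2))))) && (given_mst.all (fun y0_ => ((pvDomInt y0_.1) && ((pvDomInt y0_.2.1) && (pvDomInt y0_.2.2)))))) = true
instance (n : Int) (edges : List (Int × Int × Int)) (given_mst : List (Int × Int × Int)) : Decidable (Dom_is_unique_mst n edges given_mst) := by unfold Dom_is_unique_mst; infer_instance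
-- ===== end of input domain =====

-- B replaces the recursive path-compressed union-find with a flat component-label list and
-- one subset test; both versions sort `edges` in place (same observable mutation), and the
-- equivalence proved here is about the return value.

-- ===== PORT A =====
-- UnionFind.find with path compression; the recursion is fueled (Python recurses on the
-- parent pointer with no bound; fuel = len(parent) is shown sufficient in the proofs).
def ufFind (fuel : Nat) (parent : List Int) (u : Int) : List Int × Int :=
  match fuel with
  | 0 => (parent, PySem.List.pyGetD parent u 0)
  | fuel + 1 =>
    let pu := PySem.List.pyGetD parent u 0
    if pu ≠ u then
      let res := ufFind fuel parent pu
      let p2 := PySem.List.pySetD res.1 u res.2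
      (p2, PySem.List.pyGetD p2 u 0)
    else (parent, pu)

-- UnionFind.union
def ufUnion (parent rank : List Int) (u v : Int) : List Int × List Int :=
  let f1 := ufFind parent.length parent u
  let f2 := ufFind f1.1.length f1.1 v
  if f1.2 ≠ f2.2 then
    if PySem.List.pyGetD rank f1.2 0 > PySem.List.pyGetD rank f2.2 0 then
      (PySem.List.pySetD f2.1 f2.2 f1.2, rank)
    else if PySem.List.pyGetD rank f1.2 0 < PySem.List.pyGetD rank f2.2 0 then
      (PySem.List.pySetD f2.1 f1.2 f2.2, rank)
    else
      (PySem.List.pySetD f2.1 f2.2 f1.2,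
       PySem.List.pySetD rank f1.2 (PySem.List.pyGetD rank f1.2 0 + 1))
  else (f2.1, rank)

-- find_mst(): fresh UnionFind, one pass over edges
def findMst (n : Int) (edges : List (Int × Int × Int)) : List (Int × Int × Int) :=
  (edges.foldl (fun st e =>
      let f1 := ufFind st.1.length st.1 e.1
      let f2 := ufFind f1.1.length f1.1 e.2.1
      if f1.2 ≠ f2.2 then
        let ur := ufUnion f2.1 st.2.1 e.1 e.2.1
        (ur.1, ur.2, st.2.2 ++ [e])
      else (f2.1, st.2.1, st.2.2))
    (PySem.List.pyRange 0 n 1, PySem.List.pyRepeat [(0 : Int)] n, ([] : List (Int × Int × Int)))).2.2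

-- the final 'for u, v, w in first_mst: if … not in given_mst_set: return False, …' loop
def mstLoop (n : Int) (edges : List (Int × Int × Int)) (gset : PySem.Set (Int × Int × Int))
    (first : List (Int × Int × Int)) :
    List (Int × Int × Int) → Bool × (List (Int × Int × Int)) × (Option (List (Int × Int × Int)))
  | [] => (true, first, none)
  | e :: rest =>
    if ¬ PySem.Set.contains gset e then (false, first, some (findMst n edges))
    else mstLoop n edges gset first rest

def is_unique_mst (n : Int) (edges : List (Int × Int × Int)) (given_mst : List (Int × Int × Int)) : Bool × (List (Int × Int × Int)) × (Option (List (Int × Int × Int))) :=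
  let edges' := PySem.List.sorted edges (fun x => x.2.2) false
  let gset := PySem.Set.ofList given_mst
  let first := findMst n edges'
  if PySem.Set.equal (PySem.Set.ofList first) gset then (true, first, none)
  else mstLoop n edges' gset first first

-- ===== PORT B =====
def is_unique_mst_alt (n : Int) (edges : List (Int × Int × Int)) (given_mst : List (Int × Int × Int)) : Bool × (List (Int × Int × Int)) × (Option (List (Int × Int × Int))) :=
  let edges' := PySem.List.sorted edges (fun x => x.2.2) false
  let gset := PySem.Set.ofList given_mst
  let res := edges'.foldl (fun (st : List Int × List (Int × Int × Int)) e =>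
      let cu := PySem.List.pyGetD st.1 e.1 0
      let cv := PySem.List.pyGetD st.1 e.2.1 0
      if cu ≠ cv then (st.1.map (fun c => if c = cv then cu else c), st.2 ++ [e])
      else st)
    (PySem.List.pyRange 0 n 1, ([] : List (Int × Int × Int)))
  let first := res.2
  if first.all (fun e => PySem.Set.contains gset e) then (true, first, none)
  else (false, first, some first)

-- ===== PRECONDITION & SPEC =====
-- Pre_: every edge endpoint is a valid Python index into the n-element parent list
-- (-n ≤ u < n; Python raises IndexError otherwise). given_mst is unconstrained.
def Pre_is_unique_mst (n : Int) (edges : List (Int × Int × Int)) (given_mst : List (Int × Int × Int)) : Prop :=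
  ∀ e ∈ edges, -n ≤ e.1 ∧ e.1 < n ∧ -n ≤ e.2.1 ∧ e.2.1 < n
instance (n : Int) (edges : List (Int × Int × Int)) (given_mst : List (Int × Int × Int)) : Decidable (Pre_is_unique_mst n edges given_mst) := by unfold Pre_is_unique_mst; infer_instance

def pvWitness_is_unique_mst : Int × (List (Int × Int × Int)) × (List (Int × Int × Int)) :=
  (3, [(0, 1, 1), (1, 2, 2), (0, 2, 2)], [(0, 1, 1), (1, 2, 2)])

def Spec_is_unique_mst (n : Int) (edges : List (Int × Int × Int)) (given_mst : List (Int × Int × Int)) (out : Bool × (List (Int × Int × Int)) × (Option (List (Int × Int × Int)))) : Prop := out = is_unique_mst_alt n edges given_mst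
instance (n : Int) (edges : List (Int × Int × Int)) (given_mst : List (Int × Int × Int)) (out : Bool × (List (Int × Int × Int)) × (Option (List (Int × Int × Int)))) : Decidable (Spec_is_unique_mst n edges given_mst out) := by unfold Spec_is_unique_mst; infer_instance

-- ===== CLAIM (what is proved, stated in full; the proofs are below) =====
def Claim_equal_is_unique_mst : Prop := ∀ (n : Int) (edges : List (Int × Int × Int)) (given_mst : List (Int × Int × Int)), Dom_is_unique_mst n edges given_mst → Pre_is_unique_mst n edges given_mst → Spec_is_unique_mst n edges given_mst (is_unique_mst n edges given_mst)

-- ===== LEMMAS AND PROOFS =====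

-- resolved (Python, possibly negative) index
def pidx (n : Nat) (u : Int) : Nat := (if u < 0 then u + n else u).toNat

lemma pidx_lt {n : Nat} {u : Int} (h1 : -(n : Int) ≤ u) (h2 : u < n) : pidx n u < n := by
  unfold pidx; split <;> omega

lemma pyGetD_pidx {α : Type} [Inhabited α] (xs : List α) (u : Int) (d : α)
    (h1 : -(xs.length : Int) ≤ u) (h2 : u < xs.length) :
    PySem.List.pyGetD xs u d = xs.getD (pidx xs.length u) d := by
  unfold PySem.List.pyGetD PySem.List.pyGet? PySem.List.pyIdx? pidx
  by_cases h : 0 ≤ u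
  · have : ¬ u < 0 := by omega
    simp [h, h2, this, List.getD_eq_getElem?_getD]
  · have h0 : u < 0 := by omega
    have : xs.length - (-u).toNat = (u + ↑xs.length).toNat := by omega
    simp [h, h1, h0, this, List.getD_eq_getElem?_getD]

lemma pySetD_pidx {α : Type} (xs : List α) (u : Int) (v : α)
    (h1 : -(xs.length : Int) ≤ u) (h2 : u < xs.length) :
    PySem.List.pySetD xs u v = xs.set (pidx xs.length u) v := by
  unfold PySem.List.pySetD PySem.List.pySet? PySem.List.pyIdx? pidx
  by_cases h : 0 ≤ u
  · have : ¬ u < 0 := by omega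
    simp [h, h2, this]
  · have h0 : u < 0 := by omega
    have : xs.length - (-u).toNat = (u + ↑xs.length).toNat := by omega
    simp [h, h1, h0, this]

-- the coupling invariant between A's union-find state and B's component labels
structure UFInv (p rk comp : List Int) (n : Nat) : Prop where
  lp : p.length = n
  lr : rk.length = n
  lc : comp.length = n
  hpr : ∀ i < n, 0 ≤ p.getD i 0 ∧ p.getD i 0 < n
  hrk : ∀ i < n, p.getD i 0 ≠ (i : Int) → rk.getD i 0 < rk.getD (p.getD i 0).toNat 0
  hc1 : ∀ i < n, comp.getD (p.getD i 0).toNat 0 = comp.getD i 0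
  hc2 : ∀ i j, i < n → j < n → p.getD i 0 = (i : Int) → p.getD j 0 = (j : Int) →
          comp.getD i 0 = comp.getD j 0 → i = j

-- parent-pointer iteration
def ufIter (p : List Int) : Nat → Nat → Nat
  | 0, i => i
  | k + 1, i => ufIter p k (p.getD i 0).toNat

lemma ufIter_lt {p rk comp : List Int} {n : Nat} (h : UFInv p rk comp n) :
    ∀ k i, i < n → ufIter p k i < n := by
  intro k
  induction k with
  | zero => intro i hi; exact hi
  | succ k ih =>
    intro i hi
    have := h.hpr i hi
    exact ih _ (by omega)

lemma ufIter_succ_back (p : List Int) (k i : Nat) :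
    ufIter p (k + 1) i = (p.getD (ufIter p k i) 0).toNat := by
  induction k generalizing i with
  | zero => rfl
  | succ k ih => rw [show k + 1 + 1 = (k + 1) + 1 from rfl]; rw [ufIter, ih, ufIter]

lemma ufIter_root (p : List Int) {i : Nat} (h : p.getD i 0 = (i : Int)) :
    ∀ k, ufIter p k i = i := by
  intro k
  induction k with
  | zero => rfl
  | succ k ih => rw [ufIter]; simp only [h, Int.toNat_natCast]; exact ih

lemma comp_ufIter {p rk comp : List Int} {n : Nat} (h : UFInv p rk comp n) :
    ∀ k i, i < n → comp.getD (ufIter p k i) 0 = comp.getD i 0 := by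
  intro k
  induction k with
  | zero => intro i _; rfl
  | succ k ih =>
    intro i hi
    have hp := h.hpr i hi
    rw [ufIter, ih _ (by omega)]
    exact h.hc1 i hi

lemma rank_le_ufIter {p rk comp : List Int} {n : Nat} (h : UFInv p rk comp n) :
    ∀ k i, i < n → rk.getD i 0 ≤ rk.getD (ufIter p k i) 0 := by
  intro k
  induction k with
  | zero => intro i _; exact le_refl _
  | succ k ih =>
    intro i hi
    have hp := h.hpr i hi
    rw [ufIter]
    refine le_trans ?_ (ih _ (by omega))
    by_cases hr : p.getD i 0 = (i : Int)
    · rw [hr]; simp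
    · exact le_of_lt (h.hrk i hi hr)

lemma exists_root {p rk comp : List Int} {n : Nat} (h : UFInv p rk comp n) (i : Nat) (hi : i < n) :
    ∃ k, k < n ∧ p.getD (ufIter p k i) 0 = ((ufIter p k i : Nat) : Int) := by
  by_contra hcon
  push Not at hcon
  have chain : ∀ b a, a < b → b ≤ n → rk.getD (ufIter p a i) 0 < rk.getD (ufIter p b i) 0 := by
    intro b
    induction b with
    | zero => omega
    | succ b ih =>
      intro a ha hb
      have hlt : ufIter p b i < n := ufIter_lt h b i hi
      have hstep : rk.getD (ufIter p b i) 0 < rk.getD (ufIter p (b + 1) i) 0 := by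
        rw [ufIter_succ_back]
        exact h.hrk _ hlt (hcon b (by omega))
      rcases Nat.lt_or_ge a b with h' | h'
      · exact lt_trans (ih a h' (by omega)) hstep
      · have : a = b := by omega
        subst this; exact hstep
  have hinj : Function.Injective
      (fun k : Fin (n + 1) => (⟨ufIter p k.val i, ufIter_lt h k.val i hi⟩ : Fin n)) := by
    intro a b hab
    simp only [Fin.mk.injEq] at hab
    by_contra hne
    have hne' : a.val ≠ b.val := fun hh => hne (Fin.ext hh)
    rcases Nat.lt_or_ge a.val b.val with h' | h'
    · have := chain b.val a.val h' (by omega)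
      rw [hab] at this; omega
    · have := chain a.val b.val (by omega) (by omega)
      rw [hab] at this; omega
  have := Fintype.card_le_of_injective _ hinj
  simp at this

-- setting p[i] to a root of i's class preserves the invariant and the set of roots
lemma set_root_inv {p rk comp : List Int} {n : Nat} (h : UFInv p rk comp n)
    {i r : Nat} (hi : i < n) (hr : r < n) (hroot : p.getD r 0 = (r : Int))
    (hcomp : comp.getD r 0 = comp.getD i 0)
    (hne : p.getD i 0 ≠ (i : Int) → rk.getD i 0 < rk.getD r 0 ∧ r ≠ i)
    (hself : p.getD i 0 = (i : Int) → r = i) :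
    UFInv (p.set i (r : Int)) rk comp n ∧
      (∀ j, j < n → ((p.set i (r : Int)).getD j 0 = (j : Int) ↔ p.getD j 0 = (j : Int))) := by
  have hip : i < p.length := by rw [h.lp]; exact hi
  have hset : ∀ j, (p.set i (r : Int)).getD j 0 = if j = i then (r : Int) else p.getD j 0 := by
    intro j
    by_cases hj : j = i
    · subst hj; simp [List.getD_eq_getElem?_getD, List.getElem?_set_self hip]
    · simp [List.getD_eq_getElem?_getD, List.getElem?_set_ne (fun hh => hj hh.symm), hj]
  have hpres : ∀ j, j < n → ((p.set i (r : Int)).getD j 0 = (j : Int) ↔ p.getD j 0 = (j : Int)) := by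
    intro j hj
    rw [hset]
    by_cases hj' : j = i
    · rw [if_pos hj', hj']
      constructor
      · intro hri
        have hri' : r = i := by exact_mod_cast hri
        by_cases hroot' : p.getD i 0 = (i : Int)
        · exact hroot'
        · exact absurd hri' (hne hroot').2
      · intro hroot'
        rw [hself hroot']
    · rw [if_neg hj']
  refine ⟨⟨by simp [h.lp], h.lr, h.lc, ?_, ?_, ?_, ?_⟩, hpres⟩
  · intro j hj
    rw [hset]
    by_cases hj' : j = i
    · rw [if_pos hj']; exact ⟨Int.natCast_nonneg r, by exact_mod_cast hr⟩
    · rw [if_neg hj']; exact h.hpr j hj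
  · intro j hj hnr
    rw [hset] at hnr ⊢
    by_cases hj' : j = i
    · rw [if_pos hj'] at hnr ⊢
      rw [hj'] at hnr
      have hri : r ≠ i := fun hh => hnr (by exact_mod_cast hh)
      have hpj : p.getD i 0 ≠ (i : Int) := fun hh => hri (hself hh)
      rw [hj']
      simpa using (hne hpj).1
    · rw [if_neg hj'] at hnr ⊢; exact h.hrk j hj hnr
  · intro j hj
    rw [hset]
    by_cases hj' : j = i
    · rw [if_pos hj', hj']; simpa using hcomp
    · rw [if_neg hj']; exact h.hc1 j hj
  · intro a b ha hb hra hrb heq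
    exact h.hc2 a b ha hb ((hpres a ha).mp hra) ((hpres b hb).mp hrb) heq

lemma getD_set_ite {α : Type} (xs : List α) (i j : Nat) (v d : α) (hi : i < xs.length) :
    (xs.set i v).getD j d = if j = i then v else xs.getD j d := by
  by_cases hj : j = i
  · subst hj; simp [List.getD_eq_getElem?_getD, List.getElem?_set_self hi]
  · simp [List.getD_eq_getElem?_getD, List.getElem?_set_ne (fun hh => hj hh.symm), hj]

lemma ufFind_zero (p : List Int) (u : Int) :
    ufFind 0 p u = (p, PySem.List.pyGetD p u 0) := rfl

lemma ufFind_succ (fuel : Nat) (p : List Int) (u : Int)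
    (h : PySem.List.pyGetD p u 0 ≠ u) :
    ufFind (fuel + 1) p u =
      (PySem.List.pySetD (ufFind fuel p (PySem.List.pyGetD p u 0)).1 u
         (ufFind fuel p (PySem.List.pyGetD p u 0)).2,
       PySem.List.pyGetD
         (PySem.List.pySetD (ufFind fuel p (PySem.List.pyGetD p u 0)).1 u
           (ufFind fuel p (PySem.List.pyGetD p u 0)).2) u 0) := by
  simp only [ufFind]
  rw [if_pos h]

lemma ufFind_succ_root (fuel : Nat) (p : List Int) (u : Int)
    (h : PySem.List.pyGetD p u 0 = u) :
    ufFind (fuel + 1) p u = (p, u) := by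
  simp only [ufFind]
  rw [if_neg (by simpa using h), h]

-- ufFind on a nonnegative in-range index
lemma find_go {rk comp : List Int} {n : Nat} :
    ∀ (k : Nat) (p : List Int), UFInv p rk comp n → ∀ (i fuel : Nat), i < n →
      p.getD (ufIter p k i) 0 = ((ufIter p k i : Nat) : Int) → k ≤ fuel →
      ∃ p', ufFind fuel p (i : Int) = (p', ((ufIter p k i : Nat) : Int)) ∧
        UFInv p' rk comp n ∧
        (∀ j, j < n → (p'.getD j 0 = (j : Int) ↔ p.getD j 0 = (j : Int))) := by
  intro k
  induction k with
  | zero =>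
    intro p h i fuel hi hroot _
    refine ⟨p, ?_, h, fun j _ => Iff.rfl⟩
    cases fuel with
    | zero => rw [ufFind_zero]; simp [ufIter]; simpa using hroot
    | succ fuel => rw [ufFind_succ_root fuel p _ (by simpa using hroot)]; simp [ufIter]
  | succ k ih =>
    intro p h i fuel hi hroot hk
    by_cases hr0 : p.getD i 0 = (i : Int)
    · have hiter : ∀ m, ufIter p m i = i := ufIter_root p hr0
      obtain ⟨p', heq, hinv, hpres⟩ := ih p h i fuel hi (by rw [hiter k]; exact hr0) (by omega)
      refine ⟨p', ?_, hinv, hpres⟩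
      rw [heq, hiter k, hiter (k + 1)]
    · cases fuel with
      | zero => omega
      | succ fuel =>
        have hp := h.hpr i hi
        have hmi : p.getD i 0 = (((p.getD i 0).toNat : Nat) : Int) := by omega
        set m := (p.getD i 0).toNat with hmdef
        have hmn : m < n := by omega
        have hrootm : p.getD (ufIter p k m) 0 = ((ufIter p k m : Nat) : Int) := hroot
        obtain ⟨p', heq, hinv, hpres⟩ := ih p h m fuel hmn hrootm (by omega)
        set r := ufIter p k m with hrdef
        have hrn : r < n := ufIter_lt h k m hmn
        have hpu : PySem.List.pyGetD p ((i : Nat) : Int) 0 = ((m : Nat) : Int) := by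
          simp only [PySem.List.pyGetD_natCast]
          rw [List.getD_eq_getElem?_getD] at hmi ⊢
          exact_mod_cast hmi
        have hne' : PySem.List.pyGetD p ((i : Nat) : Int) 0 ≠ ((i : Nat) : Int) := by
          rw [hpu]; intro hh; apply hr0; rw [hmi]; exact_mod_cast hh
        have hrootp' : p'.getD r 0 = ((r : Nat) : Int) := (hpres r hrn).mpr hrootm
        have hcomp : comp.getD r 0 = comp.getD i 0 := by
          rw [hrdef, comp_ufIter h k m hmn, hmdef]
          exact h.hc1 i hi
        have hrkir : rk.getD i 0 < rk.getD r 0 :=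
          lt_of_lt_of_le (h.hrk i hi hr0) (rank_le_ufIter h k m hmn)
        have hri : r ≠ i := by
          intro hh; rw [hh] at hrkir; exact lt_irrefl _ hrkir
        obtain ⟨hinv2, hpres2⟩ :=
          set_root_inv hinv hi hrn hrootp' hcomp (fun _ => ⟨hrkir, hri⟩)
            (fun hh => absurd (by rw [← hpres i hi]; exact hh) hr0)
        refine ⟨p'.set i ((r : Nat) : Int), ?_, hinv2,
          fun j hj => (hpres2 j hj).trans (hpres j hj)⟩
        rw [ufFind_succ fuel p _ hne', hpu, heq]
        have hsetset : PySem.List.pySetD p' ((i : Nat) : Int) ((r : Nat) : Int) =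
            p'.set i ((r : Nat) : Int) := by simp
        rw [hsetset]
        have : (p'.set i ((r : Nat) : Int)).getD i 0 = ((r : Nat) : Int) := by
          rw [getD_set_ite _ _ _ _ _ (by rw [hinv.lp]; exact hi), if_pos rfl]
        simp only [PySem.List.pyGetD_natCast]
        rw [this]
        have hit : ufIter p (k + 1) i = r := by rw [ufIter]
        rw [hit]

-- ufFind on any in-range Python index
lemma find_spec {p rk comp : List Int} {n : Nat} (h : UFInv p rk comp n)
    {u : Int} (hu1 : -(n : Int) ≤ u) (hu2 : u < n) {fuel : Nat} (hfuel : n ≤ fuel) :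
    ∃ p' r, ufFind fuel p u = (p', ((r : Nat) : Int)) ∧ r < n ∧
      UFInv p' rk comp n ∧ p'.getD r 0 = ((r : Nat) : Int) ∧
      comp.getD r 0 = comp.getD (pidx n u) 0 ∧
      (∀ j, j < n → (p'.getD j 0 = (j : Int) ↔ p.getD j 0 = (j : Int))) := by
  have hidx : pidx n u < n := pidx_lt hu1 hu2
  by_cases hu0 : 0 ≤ u
  · have hieq : pidx n u = u.toNat := by unfold pidx; split <;> omega
    have hi : u.toNat < n := by omega
    obtain ⟨k, hk, hroot⟩ := exists_root h u.toNat hi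
    obtain ⟨p', heq, hinv, hpres⟩ := find_go k p h u.toNat fuel hi hroot (by omega)
    refine ⟨p', ufIter p k u.toNat, ?_, ufIter_lt h k _ hi, hinv,
      (hpres _ (ufIter_lt h k _ hi)).mpr hroot, ?_, hpres⟩
    · rw [show u = ((u.toNat : Nat) : Int) by omega]; exact heq
    · rw [comp_ufIter h k u.toNat hi, hieq]
  · have hn1 : 1 ≤ n := by omega
    cases fuel with
    | zero => omega
    | succ fuel =>
      set i := pidx n u with hidef
      have hi : i < n := hidx
      have hpu0 : PySem.List.pyGetD p u 0 = p.getD i 0 := by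
        rw [pyGetD_pidx p u 0 (by rw [h.lp]; exact hu1) (by rw [h.lp]; exact hu2), h.lp]
      have hp := h.hpr i hi
      have hmi : p.getD i 0 = (((p.getD i 0).toNat : Nat) : Int) := by omega
      set m := (p.getD i 0).toNat with hmdef
      have hmn : m < n := by omega
      have hne' : PySem.List.pyGetD p u 0 ≠ u := by rw [hpu0]; omega
      obtain ⟨k, hk, hroot⟩ := exists_root h m hmn
      obtain ⟨p', heq, hinv, hpres⟩ := find_go k p h m fuel hmn hroot (by omega)
      set r := ufIter p k m with hrdef
      have hrn : r < n := ufIter_lt h k m hmn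
      have hrootp' : p'.getD r 0 = ((r : Nat) : Int) := (hpres r hrn).mpr hroot
      have hcomp : comp.getD r 0 = comp.getD i 0 := by
        rw [hrdef, comp_ufIter h k m hmn, hmdef]
        exact h.hc1 i hi
      have hselfx : p.getD i 0 = (i : Int) → r = i := by
        intro hh
        have hmi' : m = i := by omega
        rw [hrdef, hmi']
        exact ufIter_root p hh k
      have hnex : p'.getD i 0 ≠ (i : Int) → rk.getD i 0 < rk.getD r 0 ∧ r ≠ i := by
        intro hh
        have hr0 : p.getD i 0 ≠ (i : Int) := fun hh2 => hh ((hpres i hi).mpr hh2)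
        have hlt : rk.getD i 0 < rk.getD r 0 :=
          lt_of_lt_of_le (h.hrk i hi hr0) (rank_le_ufIter h k m hmn)
        exact ⟨hlt, fun hh2 => by rw [hh2] at hlt; exact lt_irrefl _ hlt⟩
      obtain ⟨hinv2, hpres2⟩ := set_root_inv hinv hi hrn hrootp' hcomp hnex
        (fun hh => hselfx ((hpres i hi).mp hh))
      refine ⟨p'.set i ((r : Nat) : Int), r, ?_, hrn, hinv2, ?_, hcomp, 
        fun j hj => (hpres2 j hj).trans (hpres j hj)⟩
      · rw [ufFind_succ fuel p u hne', hpu0, hmi, heq]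
        have hsetset : PySem.List.pySetD p' u ((r : Nat) : Int) =
            p'.set i ((r : Nat) : Int) := by
          rw [pySetD_pidx p' u _ (by rw [hinv.lp]; exact hu1) (by rw [hinv.lp]; exact hu2),
            hinv.lp]
        rw [hsetset]
        have hget : PySem.List.pyGetD (p'.set i ((r : Nat) : Int)) u 0 =
            ((r : Nat) : Int) := by
          rw [pyGetD_pidx _ u 0 (by simp [hinv.lp]; exact hu1) (by simp [hinv.lp]; exact hu2)]
          simp only [List.length_set, hinv.lp]
          rw [← hidef, getD_set_ite _ _ _ _ _ (by rw [hinv.lp]; exact hi), if_pos rfl]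
        rw [hget]
      · rw [getD_set_ite _ _ _ _ _ (by rw [hinv.lp]; exact hi)]
        split
        · rfl
        · exact hrootp'

def relabel (comp : List Int) (cu cv : Int) : List Int :=
  comp.map (fun c => if c = cv then cu else c)

lemma relabel_getD (comp : List Int) (cu cv : Int) {j : Nat} (hj : j < comp.length) :
    (relabel comp cu cv).getD j 0 = if comp.getD j 0 = cv then cu else comp.getD j 0 := by
  unfold relabel
  rw [List.getD_eq_getElem?_getD, List.getElem?_map, List.getElem?_eq_getElem hj,
    List.getD_eq_getElem?_getD, List.getElem?_eq_getElem hj]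
  rfl

-- linking root y under root x, with comp relabelled cv → cu
lemma link_inv {p rk comp : List Int} {n : Nat} (h : UFInv p rk comp n)
    {x y : Nat} (hx : x < n) (hy : y < n) (hrx : p.getD x 0 = (x : Int))
    (hry : p.getD y 0 = (y : Int)) (hxy : x ≠ y) {cu cv : Int} (hcucv : cu ≠ cv)
    (hlab : (comp.getD x 0 = cu ∧ comp.getD y 0 = cv) ∨
      (comp.getD x 0 = cv ∧ comp.getD y 0 = cu))
    {rk' : List Int} (hlr : rk'.length = n)
    (hmono : ∀ j, j < n → rk.getD j 0 ≤ rk'.getD j 0)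
    (hnonroot : ∀ j, j < n → p.getD j 0 ≠ (j : Int) → rk'.getD j 0 = rk.getD j 0)
    (hyx : rk'.getD y 0 < rk'.getD x 0) :
    UFInv (p.set y ((x : Nat) : Int)) rk' (relabel comp cu cv) n := by
  have hyp : y < p.length := by rw [h.lp]; exact hy
  have hset := fun j => getD_set_ite p y j ((x : Nat) : Int) 0 hyp
  have hcg : ∀ j, j < n → (relabel comp cu cv).getD j 0 =
      (if comp.getD j 0 = cv then cu else comp.getD j 0) :=
    fun j hj => relabel_getD comp cu cv (by rw [h.lc]; exact hj)
  have hrootlab : ∀ s, s < n → p.getD s 0 = (s : Int) →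
      (comp.getD s 0 = cu ∨ comp.getD s 0 = cv) → s = x ∨ s = y := by
    intro s hs hrs hl
    rcases hlab with ⟨h1, h2⟩ | ⟨h1, h2⟩
    · rcases hl with hl | hl
      · exact Or.inl (h.hc2 s x hs hx hrs hrx (by rw [hl, h1]))
      · exact Or.inr (h.hc2 s y hs hy hrs hry (by rw [hl, h2]))
    · rcases hl with hl | hl
      · exact Or.inr (h.hc2 s y hs hy hrs hry (by rw [hl, h2]))
      · exact Or.inl (h.hc2 s x hs hx hrs hrx (by rw [hl, h1]))
  refine ⟨by simp [h.lp], hlr, by simp [relabel, h.lc], ?_, ?_, ?_, ?_⟩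
  · intro j hj
    rw [hset j]
    split
    · exact ⟨Int.natCast_nonneg x, by exact_mod_cast hx⟩
    · exact h.hpr j hj
  · intro j hj hnr
    rw [hset j] at hnr ⊢
    by_cases hjy : j = y
    · rw [if_pos hjy] at hnr ⊢
      simp only [Int.toNat_natCast]
      rw [hjy]
      exact hyx
    · rw [if_neg hjy] at hnr ⊢
      have hj2 := h.hpr j hj
      calc rk'.getD j 0 = rk.getD j 0 := hnonroot j hj hnr
        _ < rk.getD (p.getD j 0).toNat 0 := h.hrk j hj hnr
        _ ≤ rk'.getD (p.getD j 0).toNat 0 := hmono _ (by omega)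
  · intro j hj
    rw [hset j]
    by_cases hjy : j = y
    · rw [if_pos hjy, hjy]
      simp only [Int.toNat_natCast]
      rw [hcg x hx, hcg y hy]
      rcases hlab with ⟨h1, h2⟩ | ⟨h1, h2⟩ <;> rw [h1, h2] <;> simp [hcucv]
    · rw [if_neg hjy]
      have hj2 := h.hpr j hj
      rw [hcg _ (by omega), hcg j hj, h.hc1 j hj]
  · intro a b ha hb hra hrb heq
    rw [hset a] at hra
    rw [hset b] at hrb
    have hay : a ≠ y := by
      intro hh
      rw [if_pos hh] at hra
      have hxa : x = a := by exact_mod_cast hra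
      exact hxy (hxa ▸ hh)
    have hby : b ≠ y := by
      intro hh
      rw [if_pos hh] at hrb
      have hxb : x = b := by exact_mod_cast hrb
      exact hxy (hxb ▸ hh)
    rw [if_neg hay] at hra
    rw [if_neg hby] at hrb
    rw [hcg a ha, hcg b hb] at heq
    by_cases hac : comp.getD a 0 = cv <;> by_cases hbc : comp.getD b 0 = cv
    · exact h.hc2 a b ha hb hra hrb (by rw [hac, hbc])
    · rw [if_pos hac, if_neg hbc] at heq
      have ha' : a = x := (hrootlab a ha hra (Or.inr hac)).resolve_right hay
      have hb' : b = x := (hrootlab b hb hrb (Or.inl heq.symm)).resolve_right hby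
      rw [ha', hb']
    · rw [if_neg hac, if_pos hbc] at heq
      have ha' : a = x := (hrootlab a ha hra (Or.inl heq)).resolve_right hay
      have hb' : b = x := (hrootlab b hb hrb (Or.inr hbc)).resolve_right hby
      rw [ha', hb']
    · rw [if_neg hac, if_neg hbc] at heq
      exact h.hc2 a b ha hb hra hrb heq

lemma union_spec {p rk comp : List Int} {n : Nat} (h : UFInv p rk comp n)
    {u v : Int} (hu1 : -(n : Int) ≤ u) (hu2 : u < n) (hv1 : -(n : Int) ≤ v) (hv2 : v < n)
    (hne : comp.getD (pidx n u) 0 ≠ comp.getD (pidx n v) 0) :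
    UFInv (ufUnion p rk u v).1 (ufUnion p rk u v).2
      (relabel comp (comp.getD (pidx n u) 0) (comp.getD (pidx n v) 0)) n := by
  obtain ⟨pa, ru, heq1, hru, hinv1, hrootu, hcompu, hpres1⟩ :=
    find_spec h hu1 hu2 (fuel := p.length) (le_of_eq h.lp.symm)
  obtain ⟨pb, rv, heq2, hrv, hinv2, hrootv, hcompv, hpres2⟩ :=
    find_spec hinv1 hv1 hv2 (fuel := pa.length) (le_of_eq hinv1.lp.symm)
  have hrupb : pb.getD ru 0 = ((ru : Nat) : Int) := (hpres2 ru hru).mpr hrootu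
  have hrune : ru ≠ rv := fun hh => hne (by rw [← hcompu, ← hcompv, hh])
  have hrkru : PySem.List.pyGetD rk ((ru : Nat) : Int) 0 = rk.getD ru 0 := by simp
  have hrkrv : PySem.List.pyGetD rk ((rv : Nat) : Int) 0 = rk.getD rv 0 := by simp
  simp only [ufUnion, heq1]
  rw [heq2]
  simp only [ne_eq, Nat.cast_inj]
  rw [if_pos hrune]
  rw [hrkru, hrkrv]
  split_ifs with h1 h2
  · simp only [PySem.List.pySetD_natCast]
    exact link_inv hinv2 hru hrv hrupb hrootv hrune hne
      (Or.inl ⟨hcompu, hcompv⟩) hinv2.lr (fun j _ => le_refl _) (fun j _ _ => rfl) h1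
  · simp only [PySem.List.pySetD_natCast]
    exact link_inv hinv2 hrv hru hrootv hrupb (Ne.symm hrune) hne
      (Or.inr ⟨hcompv, hcompu⟩) hinv2.lr (fun j _ => le_refl _) (fun j _ _ => rfl) h2
  · have hreq : rk.getD ru 0 = rk.getD rv 0 := by omega
    simp only [PySem.List.pySetD_natCast]
    have hrup : ru < rk.length := by rw [h.lr]; exact hru
    have hsetr := fun j => getD_set_ite rk ru j (rk.getD ru 0 + 1) 0 hrup
    refine link_inv hinv2 hru hrv hrupb hrootv hrune hne
      (Or.inl ⟨hcompu, hcompv⟩) (by simp [h.lr]) ?_ ?_ ?_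
    · intro j hj
      rw [hsetr j]
      split
      · next hh => rw [hh]; omega
      · exact le_refl _
    · intro j hj hnr
      rw [hsetr j]
      rw [if_neg (fun hh => hnr (by rw [hh]; exact_mod_cast hrupb))]
    · rw [hsetr rv, hsetr ru, if_neg (fun hh => hrune hh.symm), if_pos rfl]
      omega

-- one edge of the two folds, coupled
lemma step_spec {p rk comp : List Int} {n : Nat} (h : UFInv p rk comp n)
    (e : Int × Int × Int) (hu1 : -(n : Int) ≤ e.1) (hu2 : e.1 < n)
    (hv1 : -(n : Int) ≤ e.2.1) (hv2 : e.2.1 < n) (mst : List (Int × Int × Int)) :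
    ∃ p' rk' comp',
      (let f1 := ufFind p.length p e.1
       let f2 := ufFind f1.1.length f1.1 e.2.1
       if f1.2 ≠ f2.2 then
         let ur := ufUnion f2.1 rk e.1 e.2.1
         (ur.1, ur.2, mst ++ [e])
       else (f2.1, rk, mst)) =
        (p', rk', if comp.getD (pidx n e.1) 0 ≠ comp.getD (pidx n e.2.1) 0 then mst ++ [e] else mst) ∧
      UFInv p' rk' comp' n ∧
      comp' = (if comp.getD (pidx n e.1) 0 ≠ comp.getD (pidx n e.2.1) 0 then
        relabel comp (comp.getD (pidx n e.1) 0) (comp.getD (pidx n e.2.1) 0) else comp) := by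
  obtain ⟨pa, ru, heq1, hru, hinv1, hrootu, hcompu, hpres1⟩ :=
    find_spec h hu1 hu2 (fuel := p.length) (le_of_eq h.lp.symm)
  obtain ⟨pb, rv, heq2, hrv, hinv2, hrootv, hcompv, hpres2⟩ :=
    find_spec hinv1 hv1 hv2 (fuel := pa.length) (le_of_eq hinv1.lp.symm)
  have hrupb : pb.getD ru 0 = ((ru : Nat) : Int) := (hpres2 ru hru).mpr hrootu
  by_cases hc : comp.getD (pidx n e.1) 0 = comp.getD (pidx n e.2.1) 0
  · have hrr : ru = rv := hinv2.hc2 ru rv hru hrv hrupb hrootv (by rw [hcompu, hcompv, hc])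
    refine ⟨pb, rk, comp, ?_, hinv2, by rw [if_neg (not_not_intro hc)]⟩
    simp only [heq1]
    rw [heq2]
    simp only [ne_eq, Nat.cast_inj]
    rw [if_neg (not_not_intro hrr), if_neg (not_not_intro hc)]
  · have hrr : ru ≠ rv := fun hh => hc (by rw [← hcompu, ← hcompv, hh])
    refine ⟨(ufUnion pb rk e.1 e.2.1).1, (ufUnion pb rk e.1 e.2.1).2,
      relabel comp (comp.getD (pidx n e.1) 0) (comp.getD (pidx n e.2.1) 0), ?_,
      union_spec hinv2 hu1 hu2 hv1 hv2 hc, by rw [if_pos hc]⟩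
    simp only [heq1]
    rw [heq2]
    simp only [ne_eq, Nat.cast_inj]
    rw [if_pos hrr, if_pos hc]

-- the two folds produce the same mst list
lemma fold_sim {n : Nat} :
    ∀ (es : List (Int × Int × Int)) (p rk comp : List Int) (mst : List (Int × Int × Int)),
      UFInv p rk comp n →
      (∀ e ∈ es, -(n : Int) ≤ e.1 ∧ e.1 < n ∧ -(n : Int) ≤ e.2.1 ∧ e.2.1 < n) →
      (es.foldl (fun st e =>
          let f1 := ufFind st.1.length st.1 e.1
          let f2 := ufFind f1.1.length f1.1 e.2.1
          if f1.2 ≠ f2.2 then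
            let ur := ufUnion f2.1 st.2.1 e.1 e.2.1
            (ur.1, ur.2, st.2.2 ++ [e])
          else (f2.1, st.2.1, st.2.2)) (p, rk, mst)).2.2 =
      (es.foldl (fun (st : List Int × List (Int × Int × Int)) e =>
          let cu := PySem.List.pyGetD st.1 e.1 0
          let cv := PySem.List.pyGetD st.1 e.2.1 0
          if cu ≠ cv then (st.1.map (fun c => if c = cv then cu else c), st.2 ++ [e])
          else st) (comp, mst)).2 := by
  intro es
  induction es with
  | nil => intro p rk comp mst _ _; rfl
  | cons e es ih =>
    intro p rk comp mst hinv hb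
    have hbe := hb e List.mem_cons_self
    obtain ⟨p', rk', comp', hstep, hinv', hcomp'⟩ :=
      step_spec hinv e hbe.1 hbe.2.1 hbe.2.2.1 hbe.2.2.2 mst
    have hcu : PySem.List.pyGetD comp e.1 0 = comp.getD (pidx n e.1) 0 := by
      rw [pyGetD_pidx comp e.1 0 (by rw [hinv.lc]; exact hbe.1) (by rw [hinv.lc]; exact hbe.2.1),
        hinv.lc]
    have hcv : PySem.List.pyGetD comp e.2.1 0 = comp.getD (pidx n e.2.1) 0 := by
      rw [pyGetD_pidx comp e.2.1 0 (by rw [hinv.lc]; exact hbe.2.2.1)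
        (by rw [hinv.lc]; exact hbe.2.2.2), hinv.lc]
    have hB : (fun (st : List Int × List (Int × Int × Int)) e =>
        let cu := PySem.List.pyGetD st.1 e.1 0
        let cv := PySem.List.pyGetD st.1 e.2.1 0
        if cu ≠ cv then (st.1.map (fun c => if c = cv then cu else c), st.2 ++ [e])
        else st) (comp, mst) e =
        (comp', if comp.getD (pidx n e.1) 0 ≠ comp.getD (pidx n e.2.1) 0
          then mst ++ [e] else mst) := by
      show (if PySem.List.pyGetD comp e.1 0 ≠ PySem.List.pyGetD comp e.2.1 0
          then (comp.map (fun c => if c = PySem.List.pyGetD comp e.2.1 0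
            then PySem.List.pyGetD comp e.1 0 else c), mst ++ [e])
          else (comp, mst)) = _
      rw [hcu, hcv]
      by_cases hc : comp.getD (pidx n e.1) 0 = comp.getD (pidx n e.2.1) 0
      · rw [if_neg (not_not_intro hc)] at hcomp'
        rw [if_neg (not_not_intro hc), if_neg (not_not_intro hc), hcomp']
      · rw [if_pos hc] at hcomp'
        rw [if_pos hc, if_pos hc, hcomp']
        rfl
    rw [List.foldl_cons, List.foldl_cons, hstep]
    refine Eq.trans (ih p' rk' comp' _ hinv' (fun x hx => hb x (List.mem_cons_of_mem e hx))) ?_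
    exact congrArg (fun st => (List.foldl (fun (st : List Int × List (Int × Int × Int)) e =>
      let cu := PySem.List.pyGetD st.1 e.1 0
      let cv := PySem.List.pyGetD st.1 e.2.1 0
      if cu ≠ cv then (st.1.map (fun c => if c = cv then cu else c), st.2 ++ [e])
      else st) st es).2) hB.symm

lemma init_inv (n : Int) :
    UFInv (PySem.List.pyRange 0 n 1) (PySem.List.pyRepeat [(0 : Int)] n)
      (PySem.List.pyRange 0 n 1) n.toNat := by
  obtain ⟨hlen, hget⟩ : ((PySem.List.pyRange 0 n 1).length = n.toNat) ∧
      (∀ i, i < n.toNat → (PySem.List.pyRange 0 n 1).getD i 0 = (i : Int)) := by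
    by_cases hn : 0 ≤ n
    · have hr := PySem.List.pyRange_zero_natCast n.toNat
      rw [show ((n.toNat : Nat) : Int) = n by omega] at hr
      constructor
      · rw [hr]; simp
      · intro i hi
        rw [hr, PySem.List.getD_map_range _ _ _ _ hi]
    · have hr : PySem.List.pyRange 0 n 1 = ([] : List Int) := by
        simp [PySem.List.pyRange, show ¬ (0 : Int) < n by omega]
      constructor
      · rw [hr]; simp only [List.length_nil]; omega
      · intro i hi; omega
  refine ⟨hlen, ?_, hlen, ?_, ?_, ?_, ?_⟩
  · rw [PySem.List.pyRepeat_singleton]; simp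
  · intro i hi
    rw [hget i hi]
    exact ⟨Int.natCast_nonneg i, by exact_mod_cast hi⟩
  · intro i hi h'
    rw [hget i hi] at h'
    exact absurd rfl h'
  · intro i hi
    rw [hget i hi, Int.toNat_natCast]
    exact hget i hi
  · intro a b ha hb _ _ heq
    rw [hget a ha, hget b hb] at heq
    exact_mod_cast heq

-- A's tail loop is a subset test
lemma mstLoop_eq (n : Int) (edges : List (Int × Int × Int)) (gset : PySem.Set (Int × Int × Int))
    (first : List (Int × Int × Int)) :
    ∀ rest, mstLoop n edges gset first rest =
      (if rest.all (fun e => PySem.Set.contains gset e) then (true, first, none)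
       else (false, first, some (findMst n edges))) := by
  intro rest
  induction rest with
  | nil => simp [mstLoop]
  | cons e rest ih =>
    rw [mstLoop]
    by_cases hce : PySem.Set.contains gset e = true
    · rw [if_neg (not_not_intro hce), ih, List.all_cons, hce, Bool.true_and]
    · rw [if_pos (by simpa using hce), List.all_cons,
        show PySem.Set.contains gset e = false from by simpa using hce, Bool.false_and]
      simp

-- ===== VERDICT (by name: the statement is the Claim_ definition above) =====
theorem is_unique_mst_spec : Claim_equal_is_unique_mst := by
  intro n edges given_mst _ hpre
  unfold Spec_is_unique_mst is_unique_mst is_unique_mst_alt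
  simp only []
  set edges' := PySem.List.sorted edges (fun x => x.2.2) false with hes
  set gset := PySem.Set.ofList given_mst with hgs
  have hb : ∀ e ∈ edges', -((n.toNat : Nat) : Int) ≤ e.1 ∧ e.1 < ((n.toNat : Nat) : Int) ∧
      -((n.toNat : Nat) : Int) ≤ e.2.1 ∧ e.2.1 < ((n.toNat : Nat) : Int) := by
    intro e he
    have hm : e ∈ edges := (PySem.List.mem_sorted _ _ _ _).mp he
    have h1 := hpre e hm
    have hn : 0 < n := by omega
    have hcast : ((n.toNat : Nat) : Int) = n := by omega
    rw [hcast]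
    exact h1
  have key : findMst n edges' =
      (edges'.foldl (fun (st : List Int × List (Int × Int × Int)) e =>
        let cu := PySem.List.pyGetD st.1 e.1 0
        let cv := PySem.List.pyGetD st.1 e.2.1 0
        if cu ≠ cv then (st.1.map (fun c => if c = cv then cu else c), st.2 ++ [e])
        else st) (PySem.List.pyRange 0 n 1, [])).2 := by
    unfold findMst
    exact fold_sim edges' _ _ _ [] (init_inv n) hb
  rw [key, mstLoop_eq]
  set first := (edges'.foldl (fun (st : List Int × List (Int × Int × Int)) e =>
    let cu := PySem.List.pyGetD st.1 e.1 0
    let cv := PySem.List.pyGetD st.1 e.2.1 0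
    if cu ≠ cv then (st.1.map (fun c => if c = cv then cu else c), st.2 ++ [e])
    else st) (PySem.List.pyRange 0 n 1, [])).2 with hfirst
  have hsub : PySem.Set.equal (PySem.Set.ofList first) gset = true →
      first.all (fun e => PySem.Set.contains gset e) = true := by
    intro h'
    rw [List.all_eq_true]
    intro e he
    have hmem := ((PySem.Set.equal_iff _ _).mp h' e).mp ((PySem.Set.mem_ofList _ _).mpr he)
    exact (PySem.Set.contains_iff _ _).mpr hmem
  by_cases hall : first.all (fun e => PySem.Set.contains gset e) = true
  · conv_rhs => rw [if_pos hall]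
    by_cases heq : PySem.Set.equal (PySem.Set.ofList first) gset = true
    · rw [if_pos heq]
    · rw [if_neg heq, if_pos hall]
  · have heq : ¬ PySem.Set.equal (PySem.Set.ofList first) gset = true :=
      fun hh => hall (hsub hh)
    conv_rhs => rw [if_neg hall]
    rw [if_neg heq, if_neg hall, key]
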